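-- pv_equiv track=rewrite | github.com/BMO4/ChordScalePlay | ChordScalePlay.py | midi_diff
-- ===== SOURCE A (Python) =====
-- def midi_diff(intkey):
--
--     mididiff = []
--     for n in range(len(intkey)):
--       if n == 0 :
--         mididiff.append(intkey[0])
--       else:
--         mididiff.append(mididiff[n-1]+ intkey[n])
--     mididiff.insert(0,0)
--
--     return(mididiff)
-- ===== SOURCE B (Python) =====
-- def midi_diff(intkey):
--     return [sum(intkey[:i]) for i in range(len(intkey) + 1)]
-- ===== Notes on version B (the rewrite author's own statement) =====
-- stated objective: simpler
-- what changed: B is a one-line comprehension that recomputes each prefix sum from scratch as sum(intkey[:i]) for i in 0..n, instead of A's indexed loop that reads the running total back out of the result list and prepends the leading 0 afterwards.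
import Mathlib
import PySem

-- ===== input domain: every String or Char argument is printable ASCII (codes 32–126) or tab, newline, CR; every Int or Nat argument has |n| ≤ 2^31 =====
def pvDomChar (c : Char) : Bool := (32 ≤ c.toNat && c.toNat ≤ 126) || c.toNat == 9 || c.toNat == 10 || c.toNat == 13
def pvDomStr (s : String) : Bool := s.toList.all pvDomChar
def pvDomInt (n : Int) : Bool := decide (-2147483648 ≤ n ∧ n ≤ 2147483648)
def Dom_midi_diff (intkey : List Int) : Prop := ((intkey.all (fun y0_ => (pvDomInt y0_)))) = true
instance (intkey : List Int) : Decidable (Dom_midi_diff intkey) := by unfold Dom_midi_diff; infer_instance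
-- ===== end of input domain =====

-- B replaces A's indexed loop (which reads the running total back out of the result list,
-- then prepends 0) by a one-line comprehension recomputing each prefix sum from a slice; simpler, not faster.

-- ===== PORT A =====
def midi_diff (intkey : List Int) : List Int :=
  let mididiff := (PySem.List.pyRange 0 (intkey.length : Int) 1).foldl
    (fun md n =>
      if n == 0 then md ++ [PySem.List.pyGetD intkey 0 0]
      else md ++ [PySem.List.pyGetD md (n - 1) 0 + PySem.List.pyGetD intkey n 0]) []
  0 :: mididiff

-- ===== PORT B =====
def midi_diff_alt (intkey : List Int) : List Int :=
  (PySem.List.pyRange 0 ((intkey.length : Int) + 1) 1).map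
    (fun i => (PySem.List.slice intkey none (some i)).sum)

-- ===== PRECONDITION & SPEC =====
def Spec_midi_diff (intkey : List Int) (out : List Int) : Prop := out = midi_diff_alt intkey
instance (intkey : List Int) (out : List Int) : Decidable (Spec_midi_diff intkey out) := by unfold Spec_midi_diff; infer_instance

-- ===== CLAIM (what is proved, stated in full; the proofs are below) =====
def Claim_equal_midi_diff : Prop := ∀ (intkey : List Int), Dom_midi_diff intkey → Spec_midi_diff intkey (midi_diff intkey)

-- ===== LEMMAS AND PROOFS =====

-- A's loop state after k iterations: the prefix sums of the first 1..k elements.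
lemma midi_diff_fold (intkey : List Int) (k : Nat) (hk : k ≤ intkey.length) :
    (PySem.List.pyRange 0 (k : Int) 1).foldl
      (fun md n =>
        if n == 0 then md ++ [PySem.List.pyGetD intkey 0 0]
        else md ++ [PySem.List.pyGetD md (n - 1) 0 + PySem.List.pyGetD intkey n 0]) []
    = (List.range k).map (fun i => (intkey.take (i + 1)).sum) := by
  induction k with
  | zero => simp
  | succ k ih =>
    have hk' : k ≤ intkey.length := Nat.le_of_succ_le hk
    have hsplit : PySem.List.pyRange 0 ((k + 1 : Nat) : Int) 1
        = PySem.List.pyRange 0 (k : Int) 1 ++ [(k : Int)] := by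
      push_cast
      exact PySem.List.pyRange_one_succ_right (by positivity)
    rw [hsplit, List.foldl_append, ih hk', List.range_succ, List.map_append]
    have htake : intkey.take (k + 1) = intkey.take k ++ (intkey[k]?).toList := List.take_add_one
    have hget : intkey[k]? = some (intkey.getD k 0) := by
      rw [List.getElem?_eq_getElem (by omega)]
      simp [List.getD_eq_getElem?_getD, List.getElem?_eq_getElem (show k < intkey.length by omega)]
    by_cases h0 : k = 0
    · subst h0
      simp only [List.foldl_cons, List.foldl_nil, Nat.cast_zero, beq_self_eq_true, if_true]
      have hget0 : PySem.List.pyGetD intkey 0 0 = intkey.getD 0 0 := by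
        simpa using PySem.List.pyGetD_natCast intkey 0 0
      rw [hget0]
      congr 1
      simp only [List.map_cons, List.map_nil]
      rw [htake, hget]
      simp [List.getD]
    · have hkpos : 0 < k := Nat.pos_of_ne_zero h0
      simp only [List.foldl_cons, List.foldl_nil]
      have hne : ((k : Int) == 0) = false := by simp; omega
      rw [hne]
      simp only [Bool.false_eq_true, if_false]
      have hidx : (k : Int) - 1 = ((k - 1 : Nat) : Int) := by omega
      rw [hidx, PySem.List.pyGetD_natCast, PySem.List.pyGetD_natCast]
      congr 1
      have hprev : ((List.range k).map (fun i => (intkey.take (i + 1)).sum)).getD (k - 1) 0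
          = (intkey.take k).sum := by
        rw [List.getD_eq_getElem _ _ (by simpa using Nat.sub_lt hkpos one_pos)]
        simp only [List.getElem_map, List.getElem_range]
        congr 2
        omega
      rw [hprev]
      simp only [List.map_cons, List.map_nil]
      rw [htake, hget]
      simp [List.getD]

lemma midi_diff_alt_eq (intkey : List Int) :
    midi_diff_alt intkey = (List.range (intkey.length + 1)).map (fun i => (intkey.take i).sum) := by
  unfold midi_diff_alt
  have : ((intkey.length : Int) + 1) = ((intkey.length + 1 : Nat) : Int) := by push_cast; ring
  rw [this, PySem.List.pyRange_zero_natCast]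
  rw [List.map_map]
  apply List.map_congr_left
  intro k hk
  simp [PySem.List.slice_to_natCast]

-- ===== VERDICT (by name: the statement is the Claim_ definition above) =====
theorem midi_diff_spec : Claim_equal_midi_diff := by
  intro intkey _
  unfold Spec_midi_diff midi_diff
  rw [midi_diff_fold intkey intkey.length le_rfl, midi_diff_alt_eq]
  rw [List.range_succ_eq_map, List.map_cons, List.map_map]
  simp
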